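-- pv_equiv track=rewrite | github.com/waltbai/G2S-TKG-forecasting | src/utils/metric.py | compute_rank
-- ===== SOURCE A (Python) =====
-- from typing import List, Dict
--
-- def compute_rank(
--         preds: List[str],
--         answer: str,
--         filters: List[str] = None
-- ) -> int:
--     """Compute rank of each true label."""
--     rank = None
--     try:
--         if filters is not None:
--             preds = [_ for _ in preds if _ not in filters]
--         rank = preds.index(answer)
--     except ValueError:
--         pass
--     return rank
-- ===== SOURCE B (Python) =====
-- def compute_rank(preds, answer, filters=None):
--     """Compute rank of answer among non-filtered predictions.
--
--     Single fused pass: no filtered list is built; a counter tracks how many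
--     kept elements precede the current one.
--     """
--     count = 0
--     for p in preds:
--         if filters is not None and p in filters:
--             continue
--         if p == answer:
--             return count
--         count += 1
--     return None
-- ===== Notes on version B (the rewrite author's own statement) =====
-- stated objective: simpler
-- what changed: Replaces build-a-filtered-list-then-scan-with-.index (plus try/except ValueError) by one fused pass over preds that keeps a counter of non-filtered elements and returns it when the answer is met, returning None after the loop.
import Mathlib
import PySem

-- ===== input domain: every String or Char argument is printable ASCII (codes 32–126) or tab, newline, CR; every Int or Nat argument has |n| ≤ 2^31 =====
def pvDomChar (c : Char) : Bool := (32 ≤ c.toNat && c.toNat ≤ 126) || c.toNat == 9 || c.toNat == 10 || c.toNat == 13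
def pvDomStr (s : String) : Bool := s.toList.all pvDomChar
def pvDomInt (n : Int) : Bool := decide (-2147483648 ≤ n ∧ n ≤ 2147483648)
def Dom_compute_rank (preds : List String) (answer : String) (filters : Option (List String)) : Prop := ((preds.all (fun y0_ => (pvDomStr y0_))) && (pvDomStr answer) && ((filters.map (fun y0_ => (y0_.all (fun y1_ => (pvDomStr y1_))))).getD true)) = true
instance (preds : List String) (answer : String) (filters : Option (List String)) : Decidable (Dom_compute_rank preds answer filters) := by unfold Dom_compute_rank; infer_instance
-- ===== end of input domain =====

-- B replaces A's build-filtered-list-then-.index (with try/except) by a single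
-- fused pass keeping a counter of non-filtered elements (objective: simpler).

-- ===== PORT A =====
-- A: filter preds (if filters given), then list.index, ValueError -> None.
def compute_rank (preds : List String) (answer : String) (filters : Option (List String)) : Option Int :=
  let preds' : List String :=
    match filters with
    | some fs => preds.filter (fun p => !(fs.contains p))
    | none => preds
  (PySem.List.index? preds' answer).map (fun n => (n : Int))

-- ===== PORT B =====
-- B's loop: counter of kept elements seen so far; filter-check before equality.
def computeRankLoop (answer : String) (filters : Option (List String)) :
    List String → Int → Option Int
  | [], _ => none
  | p :: rest, count =>
    if (match filters with | some fs => fs.contains p | none => false) then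
      computeRankLoop answer filters rest count
    else if p == answer then some count
    else computeRankLoop answer filters rest (count + 1)

def compute_rank_alt (preds : List String) (answer : String) (filters : Option (List String)) : Option Int :=
  computeRankLoop answer filters preds 0

-- ===== PRECONDITION & SPEC =====
def Spec_compute_rank (preds : List String) (answer : String) (filters : Option (List String)) (out : Option Int) : Prop := out = compute_rank_alt preds answer filters
instance (preds : List String) (answer : String) (filters : Option (List String)) (out : Option Int) : Decidable (Spec_compute_rank preds answer filters out) := by unfold Spec_compute_rank; infer_instance

-- ===== CLAIM (what is proved, stated in full; the proofs are below) =====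
def Claim_equal_compute_rank : Prop := ∀ (preds : List String) (answer : String) (filters : Option (List String)), Dom_compute_rank preds answer filters → Spec_compute_rank preds answer filters (compute_rank preds answer filters)

-- ===== LEMMAS AND PROOFS =====

-- The loop equals index? of the filtered list, shifted by the running counter.
theorem computeRankLoop_eq (answer : String) (filters : Option (List String)) :
    ∀ (preds : List String) (c : Int),
      computeRankLoop answer filters preds c =
        (PySem.List.index?
          (match filters with
            | some fs => preds.filter (fun p => !(fs.contains p))
            | none => preds) answer).map (fun n => (n : Int) + c)
  | [], c => by cases filters <;> simp [computeRankLoop, PySem.List.index?]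
  | p :: rest, c => by
    cases filters with
    | none =>
      by_cases hpa : p = answer
      · subst hpa
        rw [show (match (none : Option (List String)) with
              | some fs => (p :: rest).filter (fun q => !(fs.contains q))
              | none => p :: rest) = p :: rest from rfl,
            PySem.List.index?_cons_self]
        simp [computeRankLoop]
      · rw [show (match (none : Option (List String)) with
              | some fs => (p :: rest).filter (fun q => !(fs.contains q))
              | none => p :: rest) = p :: rest from rfl,
            PySem.List.index?_cons_of_ne rest hpa]
        simp only [computeRankLoop, beq_iff_eq, if_neg hpa]
        rw [computeRankLoop_eq answer none rest (c + 1)]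
        cases PySem.List.index? rest answer <;> simp <;> ring
    | some fs =>
      have hcons : (match (some fs : Option (List String)) with
            | some fs => (p :: rest).filter (fun q => !(fs.contains q))
            | none => p :: rest)
          = if fs.contains p then rest.filter (fun q => !(fs.contains q))
            else p :: rest.filter (fun q => !(fs.contains q)) := by
        simp [List.filter_cons]
      by_cases hf : fs.contains p
      · rw [hcons, if_pos hf]
        simp only [computeRankLoop, hf, if_true]
        rw [computeRankLoop_eq answer (some fs) rest c]
      · rw [hcons, if_neg hf]
        by_cases hpa : p = answer
        · subst hpa
          have hmem : p ∉ fs := by simpa using hf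
          rw [PySem.List.index?_cons_self]
          simp [computeRankLoop, hmem]
        · rw [PySem.List.index?_cons_of_ne _ hpa]
          simp only [computeRankLoop, hf, beq_iff_eq, if_neg hpa, Bool.false_eq_true,
            if_false]
          rw [computeRankLoop_eq answer (some fs) rest (c + 1)]
          cases PySem.List.index? (rest.filter (fun q => !(fs.contains q))) answer <;>
            simp <;> ring

-- ===== VERDICT (by name: the statement is the Claim_ definition above) =====
theorem compute_rank_spec : Claim_equal_compute_rank := by
  intro preds answer filters _
  unfold Spec_compute_rank compute_rank compute_rank_alt
  rw [computeRankLoop_eq answer filters preds 0]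
  cases filters <;> simp
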